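-- pv_equiv track=rewrite | github.com/almbayedahmad/contracts-ai | legacy/pipeline/reader.py | repack_paragraphs
-- ===== SOURCE A (Python) =====
-- def repack_paragraphs(s: str) -> str:
--     # single blank line between paragraphs
--     s = s.replace("\r\n", "\n").replace("\r", "\n")
--     lines = [ln.strip() for ln in s.split("\n")]
--     out, buf = [], []
--     for ln in lines:
--         if not ln:
--             if buf:
--                 out.append(" ".join(buf).strip())
--                 buf = []
--         else:
--             buf.append(ln)
--     if buf:
--         out.append(" ".join(buf).strip())
--     return "\n\n".join(out)
-- ===== SOURCE B (Python) =====
-- def repack_paragraphs(s: str) -> str: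
--     # run-scanner: find maximal runs of non-blank lines with two pointers,
--     # join each run into a paragraph (no buffer/flush accumulator)
--     s = s.replace("\r\n", "\n").replace("\r", "\n")
--     lines = [ln.strip() for ln in s.split("\n")]
--     paras = []
--     i, n = 0, len(lines)
--     while i < n:
--         if lines[i]:
--             j = i
--             while j < n and lines[j]:
--                 j += 1
--             paras.append(" ".join(lines[i:j]))
--             i = j
--         else:
--             i += 1
--     return "\n\n".join(paras)
-- ===== Notes on version B (the rewrite author's own statement) =====
-- stated objective: alternative
-- what changed: Replaced the buffer/flush accumulator loop by a two-pointer run scanner that extracts each maximal run of non-blank lines and joins it directly (A's redundant per-paragraph .strip() also disappears).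
import Mathlib
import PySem

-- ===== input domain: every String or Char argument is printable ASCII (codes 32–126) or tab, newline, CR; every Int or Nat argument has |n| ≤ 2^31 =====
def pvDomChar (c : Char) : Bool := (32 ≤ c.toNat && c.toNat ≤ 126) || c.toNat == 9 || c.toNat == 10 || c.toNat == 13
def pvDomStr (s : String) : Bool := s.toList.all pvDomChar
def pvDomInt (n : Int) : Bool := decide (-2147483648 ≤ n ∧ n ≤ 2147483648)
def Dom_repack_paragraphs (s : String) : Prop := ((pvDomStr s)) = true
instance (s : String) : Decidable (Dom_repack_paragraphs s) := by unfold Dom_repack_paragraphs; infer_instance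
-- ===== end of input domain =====

-- B replaces A's buffer/flush accumulator by a two-pointer run scanner over the
-- stripped lines (objective: alternative; same cost).

-- ===== PORT A =====
-- one step of A's for-loop over (out, buf)
def pvStepA (st : List String × List String) (ln : String) : List String × List String :=
  if ln = "" then
    if st.2 ≠ [] then (st.1 ++ [PySem.Str.strip (PySem.Str.join " " st.2)], []) else st
  else (st.1, st.2 ++ [ln])

-- A's trailing 'if buf:' flush after the loop
def pvFinish (st : List String × List String) : List String :=
  if st.2 ≠ [] then st.1 ++ [PySem.Str.strip (PySem.Str.join " " st.2)] else st.1

def repack_paragraphs (s : String) : String :=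
  PySem.Str.join "\n\n"
    (pvFinish ((((PySem.Chars.splitOn
        (PySem.Str.replace (PySem.Str.replace s "\r\n" "\n") "\r" "\n").toList
        ['\n']).map String.ofList).map PySem.Str.strip).foldl pvStepA ([], [])))

-- ===== PORT B =====
-- Source B's two-pointer scan: the inner `while j < n and lines[j]` advance is the
-- maximal non-blank run (takeWhile) and `i = j` resumes after it (dropWhile)
def pvRuns : List String → List (List String)
  | [] => []
  | l :: ls =>
    if l = "" then pvRuns ls
    else (l :: ls.takeWhile (· ≠ "")) :: pvRuns (ls.dropWhile (· ≠ ""))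
termination_by ls => ls.length
decreasing_by
  · simp
  · exact Nat.lt_succ_of_le (List.length_dropWhile_le _ _)

def repack_paragraphs_alt (s : String) : String :=
  PySem.Str.join "\n\n"
    ((pvRuns (((PySem.Chars.splitOn
        (PySem.Str.replace (PySem.Str.replace s "\r\n" "\n") "\r" "\n").toList
        ['\n']).map String.ofList).map PySem.Str.strip)).map (PySem.Str.join " "))

-- ===== PRECONDITION & SPEC =====
def Spec_repack_paragraphs (s : String) (out : String) : Prop := out = repack_paragraphs_alt s
instance (s : String) (out : String) : Decidable (Spec_repack_paragraphs s out) := by unfold Spec_repack_paragraphs; infer_instance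

-- ===== CLAIM (what is proved, stated in full; the proofs are below) =====
def Claim_equal_repack_paragraphs : Prop := ∀ (s : String), Dom_repack_paragraphs s → Spec_repack_paragraphs s (repack_paragraphs s)

-- ===== LEMMAS AND PROOFS =====

-- `pvOk cs`: cs is nonempty and starts with a non-whitespace char
def pvOk : List Char → Bool
  | [] => false
  | c :: _ => !PySem.Chars.isspace c

theorem lstrip_of_pvOk (cs : List Char) (h : pvOk cs = true) :
    PySem.Chars.lstrip cs = cs := by
  cases cs with
  | nil => simp [pvOk] at h
  | cons c t =>
    simp [pvOk] at h
    simp [PySem.Chars.lstrip, List.dropWhile, h]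

theorem rstrip_of_pvOk_rev (cs : List Char) (h : pvOk cs.reverse = true) :
    PySem.Chars.rstrip cs = cs := by
  have h2 := lstrip_of_pvOk cs.reverse h
  unfold PySem.Chars.rstrip
  unfold PySem.Chars.lstrip at h2
  rw [h2, List.reverse_reverse]

theorem pvOk_dropWhile (l : List Char) :
    l.dropWhile PySem.Chars.isspace = [] ∨ pvOk (l.dropWhile PySem.Chars.isspace) = true := by
  induction l with
  | nil => left; rfl
  | cons c t ih =>
    by_cases h : PySem.Chars.isspace c = true
    · simpa [List.dropWhile, h] using ih
    · right
      simp at h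
      simp [List.dropWhile, h, pvOk]

-- head side of a nonempty strip result
theorem pvOk_strip (x : List Char) (h : PySem.Chars.strip x ≠ []) :
    pvOk (PySem.Chars.strip x) = true := by
  have hpre : PySem.Chars.strip x <+: PySem.Chars.lstrip x := by
    have hs : (PySem.Chars.lstrip x).reverse.dropWhile PySem.Chars.isspace <:+
        (PySem.Chars.lstrip x).reverse := List.dropWhile_suffix _
    have := List.reverse_prefix.mpr hs
    simpa [PySem.Chars.strip, PySem.Chars.rstrip] using this
  rcases pvOk_dropWhile x with hx | hx
  · exfalso
    apply h
    have hx' : PySem.Chars.lstrip x = [] := hx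
    simp [PySem.Chars.strip, hx', PySem.Chars.rstrip]
  · have hx' : pvOk (PySem.Chars.lstrip x) = true := hx
    rcases hpre with ⟨r, hr⟩
    cases hst : PySem.Chars.strip x with
    | nil => exact absurd hst h
    | cons c t =>
      rw [hst] at hr
      cases hl : PySem.Chars.lstrip x with
      | nil => rw [hl] at hr; simp at hr
      | cons d u =>
        rw [hl] at hr
        have hcd : c = d := by
          have := hr
          simp at this
          exact this.1
        rw [hl] at hx'
        simp [pvOk] at hx' ⊢
        rw [hcd]; exact hx'

-- tail side of a nonempty strip result
theorem pvOk_strip_rev (x : List Char) (h : PySem.Chars.strip x ≠ []) :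
    pvOk (PySem.Chars.strip x).reverse = true := by
  have hdef : (PySem.Chars.strip x).reverse
      = (PySem.Chars.lstrip x).reverse.dropWhile PySem.Chars.isspace := by
    simp [PySem.Chars.strip, PySem.Chars.rstrip]
  rcases pvOk_dropWhile (PySem.Chars.lstrip x).reverse with hx | hx
  · exfalso; apply h
    have : (PySem.Chars.strip x).reverse = [] := by rw [hdef]; exact hx
    simpa using this
  · rw [hdef]; exact hx

theorem strip_of_ok (cs : List Char) (h1 : pvOk cs = true) (h2 : pvOk cs.reverse = true) :
    PySem.Chars.strip cs = cs := by
  simp [PySem.Chars.strip, lstrip_of_pvOk cs h1, rstrip_of_pvOk_rev cs h2]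

theorem strip_idem (x : List Char) :
    PySem.Chars.strip (PySem.Chars.strip x) = PySem.Chars.strip x := by
  by_cases h : PySem.Chars.strip x = []
  · rw [h]; rfl
  · exact strip_of_ok _ (pvOk_strip x h) (pvOk_strip_rev x h)

-- the property A's buffer elements keep: nonempty and strip-fixed
def pvGood (e : String) : Prop := e ≠ "" ∧ PySem.Str.strip e = e

theorem toList_ne_nil {e : String} (h : e ≠ "") : e.toList ≠ [] := by
  intro hx
  apply h
  have := congrArg String.ofList hx
  simpa using this

theorem pvGood_ok {e : String} (h : pvGood e) :
    pvOk e.toList = true ∧ pvOk e.toList.reverse = true := by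
  obtain ⟨h1, h2⟩ := h
  have hne : e.toList ≠ [] := toList_ne_nil h1
  have hts : PySem.Chars.strip e.toList = e.toList := by
    have := congrArg String.toList h2
    simpa [PySem.Str.strip] using this
  constructor
  · have := pvOk_strip e.toList (by rw [hts]; exact hne)
    rwa [hts] at this
  · have := pvOk_strip_rev e.toList (by rw [hts]; exact hne)
    rwa [hts] at this

-- joining good strings with " " yields an ok string on both ends
theorem pvOk_join (l : List String) (hl : l ≠ []) (hg : ∀ e ∈ l, pvGood e) :
    pvOk (PySem.Chars.join [' '] (l.map String.toList)) = true := by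
  cases l with
  | nil => exact absurd rfl hl
  | cons b bs =>
    have hb : pvOk b.toList = true := (pvGood_ok (hg b (by simp))).1
    cases hbt : b.toList with
    | nil => rw [hbt] at hb; simp [pvOk] at hb
    | cons c t =>
      rw [hbt] at hb
      cases bs with
      | nil => simpa [PySem.Chars.join, List.intercalate, hbt] using hb
      | cons q rest =>
        rw [List.map_cons, List.map_cons, PySem.Chars.join_cons_cons, hbt]
        simpa [pvOk] using (by simpa [pvOk] using hb)

theorem join_sp_append_singleton (x : List Char) : ∀ (ys : List (List Char)), ys ≠ [] →
    PySem.Chars.join [' '] (ys ++ [x]) = PySem.Chars.join [' '] ys ++ [' '] ++ x := by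
  intro ys
  induction ys with
  | nil => intro hys; exact absurd rfl hys
  | cons a as ih2 =>
    intro _
    cases as with
    | nil => simp [PySem.Chars.join, List.intercalate]
    | cons a2 as2 =>
      rw [List.cons_append, List.cons_append, PySem.Chars.join_cons_cons,
        PySem.Chars.join_cons_cons, ← List.cons_append, ih2 (by simp)]
      simp

theorem reverse_join_sp (l : List (List Char)) :
    (PySem.Chars.join [' '] l).reverse = PySem.Chars.join [' '] (l.reverse.map List.reverse) := by
  induction l with
  | nil => simp [PySem.Chars.join, List.intercalate]
  | cons b bs ih =>
    cases bs with
    | nil => simp [PySem.Chars.join, List.intercalate]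
    | cons q rest =>
      rw [PySem.Chars.join_cons_cons, List.reverse_cons, List.map_append, List.map_cons,
        List.map_nil, join_sp_append_singleton b.reverse _ (by simp), ← ih]
      simp

theorem flush_strip (buf : List String) (hne : buf ≠ []) (hg : ∀ e ∈ buf, pvGood e) :
    PySem.Str.strip (PySem.Str.join " " buf) = PySem.Str.join " " buf := by
  have hsep : (" " : String).toList = [' '] := rfl
  have h1 : pvOk (PySem.Chars.join [' '] (buf.map String.toList)) = true :=
    pvOk_join buf hne hg
  have h2 : pvOk (PySem.Chars.join [' '] (buf.map String.toList)).reverse = true := by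
    rw [reverse_join_sp]
    have : (buf.map String.toList).reverse.map List.reverse
        = (buf.reverse.map (fun e => e.toList.reverse)) := by
      simp [List.map_reverse, Function.comp]
    rw [this]
    have : buf.reverse.map (fun e => e.toList.reverse)
        = (buf.reverse.map (fun e => String.ofList e.toList.reverse)).map String.toList := by
      simp [Function.comp]
    rw [this]
    apply pvOk_join
    · simpa using hne
    · intro e he
      simp at he
      obtain ⟨a, ha, rfl⟩ := he
      obtain ⟨hao1, hao2⟩ := pvGood_ok (hg a ha)
      constructor
      · intro hx
        apply toList_ne_nil (hg a ha).1
        have := congrArg String.toList hx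
        simpa using this
      · rw [PySem.Str.strip, String.toList_ofList,
          strip_of_ok _ hao2 (by simpa using hao1)]
  rw [PySem.Str.join, PySem.Str.strip, String.toList_ofList, hsep, strip_of_ok _ h1 h2]

-- A's loop with a pending buffer, expressed as the groups it will emit
def pvGroupsFrom : List String → List String → List (List String)
  | buf, [] => if buf = [] then [] else [buf]
  | buf, l :: ls =>
    if l = "" then (if buf = [] then [] else [buf]) ++ pvGroupsFrom [] ls
    else pvGroupsFrom (buf ++ [l]) ls

theorem loopA_eq (lines : List String) : ∀ (out buf : List String),
    (∀ e ∈ buf, pvGood e) → (∀ e ∈ lines, PySem.Str.strip e = e) →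
    pvFinish (lines.foldl pvStepA (out, buf))
      = out ++ (pvGroupsFrom buf lines).map (PySem.Str.join " ") := by
  induction lines with
  | nil =>
    intro out buf hbuf _
    by_cases h : buf = []
    · simp [pvFinish, pvGroupsFrom, h]
    · simp [pvFinish, pvGroupsFrom, h, flush_strip buf h hbuf]
  | cons l ls ih =>
    intro out buf hbuf hln
    by_cases h : l = ""
    · by_cases hb : buf = []
      · subst h; subst hb
        rw [List.foldl_cons, show pvStepA (out, []) "" = (out, []) from by simp [pvStepA]]
        rw [ih out [] (by simp) (fun e he => hln e (by simp [he]))]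
        simp [pvGroupsFrom]
      · subst h
        rw [List.foldl_cons, show pvStepA (out, buf) ""
            = (out ++ [PySem.Str.strip (PySem.Str.join " " buf)], []) from by
          simp [pvStepA, hb]]
        rw [ih (out ++ [PySem.Str.strip (PySem.Str.join " " buf)]) [] (by simp)
          (fun e he => hln e (by simp [he]))]
        simp [pvGroupsFrom, hb, flush_strip buf hb hbuf]
    · rw [List.foldl_cons, show pvStepA (out, buf) l = (out, buf ++ [l]) from by
        simp [pvStepA, h]]
      rw [ih out (buf ++ [l]) ?_ (fun e he => hln e (by simp [he]))]
      · simp [pvGroupsFrom, h]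
      · intro e he
        rcases List.mem_append.mp he with he | he
        · exact hbuf e he
        · simp at he
          subst he
          exact ⟨h, hln e (by simp)⟩

theorem pvRuns_unfold (lines : List String) :
    pvRuns lines = (if lines.takeWhile (· ≠ "") = [] then []
        else [lines.takeWhile (· ≠ "")]) ++ pvRuns (lines.dropWhile (· ≠ "")) := by
  cases lines with
  | nil => simp [pvRuns]
  | cons l ls =>
    by_cases h : l = ""
    · simp [pvRuns, h, List.takeWhile, List.dropWhile]
    · simp [pvRuns, h, List.takeWhile, List.dropWhile]

theorem groupsFrom_eq_runs (lines : List String) : ∀ buf : List String,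
    pvGroupsFrom buf lines
      = (if buf ++ lines.takeWhile (· ≠ "") = [] then []
          else [buf ++ lines.takeWhile (· ≠ "")]) ++ pvRuns (lines.dropWhile (· ≠ "")) := by
  induction lines with
  | nil =>
    intro buf
    by_cases h : buf = [] <;> simp [pvGroupsFrom, pvRuns, h]
  | cons l ls ih =>
    intro buf
    by_cases h : l = ""
    · rw [show pvGroupsFrom buf (l :: ls)
          = (if buf = [] then [] else [buf]) ++ pvGroupsFrom [] ls from by
        simp [pvGroupsFrom, h]]
      rw [ih []]
      simp only [List.nil_append]
      rw [← pvRuns_unfold ls]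
      have ht : (l :: ls).takeWhile (· ≠ "") = [] := by simp [List.takeWhile, h]
      have hd : (l :: ls).dropWhile (· ≠ "") = l :: ls := by simp [List.dropWhile, h]
      rw [ht, hd]
      simp [pvRuns, h]
    · rw [show pvGroupsFrom buf (l :: ls) = pvGroupsFrom (buf ++ [l]) ls from by
        simp [pvGroupsFrom, h]]
      rw [ih (buf ++ [l])]
      have ht : (l :: ls).takeWhile (· ≠ "") = l :: ls.takeWhile (· ≠ "") := by
        simp [List.takeWhile, h]
      have hd : (l :: ls).dropWhile (· ≠ "") = ls.dropWhile (· ≠ "") := by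
        simp [List.dropWhile, h]
      rw [ht, hd]
      simp

theorem str_strip_idem (y : String) :
    PySem.Str.strip (PySem.Str.strip y) = PySem.Str.strip y := by
  simp only [PySem.Str.strip, String.toList_ofList, strip_idem]

-- ===== VERDICT (by name: the statement is the Claim_ definition above) =====
theorem repack_paragraphs_spec : Claim_equal_repack_paragraphs := by
  intro s _
  unfold Spec_repack_paragraphs repack_paragraphs repack_paragraphs_alt
  have hfix : ∀ e ∈ (((PySem.Chars.splitOn
      (PySem.Str.replace (PySem.Str.replace s "\r\n" "\n") "\r" "\n").toList
      ['\n']).map String.ofList).map PySem.Str.strip), PySem.Str.strip e = e := by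
    intro e he
    simp only [List.mem_map] at he
    obtain ⟨a, _, rfl⟩ := he
    exact str_strip_idem a
  generalize hL : (((PySem.Chars.splitOn
      (PySem.Str.replace (PySem.Str.replace s "\r\n" "\n") "\r" "\n").toList
      ['\n']).map String.ofList).map PySem.Str.strip) = L at hfix ⊢
  rw [loopA_eq L [] [] (by simp) hfix, groupsFrom_eq_runs L []]
  simp only [List.nil_append]
  rw [← pvRuns_unfold L]
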